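-- pv_equiv track=rewrite | github.com/ivan12093/cg | lab_09/main.py | check_clip
-- ===== SOURCE A (Python) =====
-- def check_clip(clip):
--     global_direction = 0
--     i = 0
--     n = len(clip)
--     for i in range(n - 1):
--         cur_direction = vect_mult_sign_z(clip[i][0], clip[i][1], clip[i + 1][1])
--
--         if global_direction == 0:
--             global_direction = cur_direction
--         else:
--             if global_direction != cur_direction:
--                 return False
--     return True
--
-- def vect_mult_sign_z(point1, point2, point3):
--     x1 = point2[0] - point1[0]
--     y1 = point2[1] - point1[1]
--     x2 = point3[0] - point2[0]
--     y2 = point3[1] - point2[1]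
--     z = x1 * y2 - y1 * x2
--     if z > 0:
--         return 1
--     elif z < 0:
--         return -1
--     return 0
-- ===== SOURCE B (Python) =====
-- def check_clip(clip):
--     return all(
--         vect_mult_sign_z(p[0], p[1], q[1]) in (0, vect_mult_sign_z(q[0], q[1], r[1]))
--         for p, q, r in zip(clip, clip[1:], clip[2:])
--     )
--
-- def vect_mult_sign_z(point1, point2, point3):
--     x1 = point2[0] - point1[0]
--     y1 = point2[1] - point1[1]
--     x2 = point3[0] - point2[0]
--     y2 = point3[1] - point2[1]
--     z = x1 * y2 - y1 * x2
--     if z > 0: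
--         return 1
--     elif z < 0:
--         return -1
--     return 0
-- ===== Notes on version B (the rewrite author's own statement) =====
-- stated objective: alternative
-- what changed: A threads a latched global_direction accumulator through an index loop with an early return; B keeps no state at all and instead checks a local property over windows of three consecutive clip segments: every nonzero turn sign must equal the turn sign immediately following it (a nonzero sign propagating to its successor is equivalent to the first nonzero sign latching for the whole tail).
import Mathlib
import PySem

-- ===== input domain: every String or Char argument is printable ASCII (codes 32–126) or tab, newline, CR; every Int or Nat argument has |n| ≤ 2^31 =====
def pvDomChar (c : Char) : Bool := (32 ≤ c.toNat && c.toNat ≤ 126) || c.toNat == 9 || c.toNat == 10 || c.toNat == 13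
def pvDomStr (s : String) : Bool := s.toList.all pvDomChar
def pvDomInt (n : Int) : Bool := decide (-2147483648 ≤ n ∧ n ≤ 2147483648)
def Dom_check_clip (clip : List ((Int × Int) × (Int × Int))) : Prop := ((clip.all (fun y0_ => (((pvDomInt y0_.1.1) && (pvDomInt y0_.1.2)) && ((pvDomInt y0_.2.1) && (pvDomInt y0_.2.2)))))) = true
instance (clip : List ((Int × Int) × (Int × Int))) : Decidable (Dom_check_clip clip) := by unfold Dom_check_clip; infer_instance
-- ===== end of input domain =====

-- B replaces A's latched global_direction state machine by a stateless local check over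
-- windows of three consecutive clip segments: every nonzero turn sign must equal the
-- sign right after it (objective: alternative decomposition, same O(n) cost).


-- ===== PORT A =====
def vect_mult_sign_z (point1 point2 point3 : Int × Int) : Int :=
  let x1 := point2.1 - point1.1
  let y1 := point2.2 - point1.2
  let x2 := point3.1 - point2.1
  let y2 := point3.2 - point2.2
  let z := x1 * y2 - y1 * x2
  if z > 0 then 1 else if z < 0 then -1 else 0

-- the 'for i in range(n-1)' loop with early return, threading global_direction
def check_clip_loop (clip : List ((Int × Int) × (Int × Int))) :
    List Int → Int → Bool
  | [], _ => true
  | i :: rest, global_direction =>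
    let ci := PySem.List.pyGetD clip i ((0, 0), (0, 0))
    let ci1 := PySem.List.pyGetD clip (i + 1) ((0, 0), (0, 0))
    let cur_direction := vect_mult_sign_z ci.1 ci.2 ci1.2
    if global_direction = 0 then check_clip_loop clip rest cur_direction
    else if global_direction ≠ cur_direction then false
    else check_clip_loop clip rest global_direction

def check_clip (clip : List ((Int × Int) × (Int × Int))) : Bool :=
  let n : Int := clip.length
  check_clip_loop clip (PySem.List.pyRange 0 (n - 1) 1) 0

-- ===== PORT B =====
-- all(s1 in (0, s2) for p, q, r in zip(clip, clip[1:], clip[2:]));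
-- Python 's1 in (0, s2)' is ported exactly as 's1 == 0 || s1 == s2'
def check_clip_alt (clip : List ((Int × Int) × (Int × Int))) : Bool :=
  ((clip.zip (clip.drop 1)).zip (clip.drop 2)).all (fun w =>
    let s1 := vect_mult_sign_z w.1.1.1 w.1.1.2 w.1.2.2
    let s2 := vect_mult_sign_z w.1.2.1 w.1.2.2 w.2.2
    s1 == 0 || s1 == s2)

-- ===== PRECONDITION & SPEC =====
def Spec_check_clip (clip : List ((Int × Int) × (Int × Int))) (out : Bool) : Prop := out = check_clip_alt clip
instance (clip : List ((Int × Int) × (Int × Int))) (out : Bool) : Decidable (Spec_check_clip clip out) := by unfold Spec_check_clip; infer_instance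

-- ===== CLAIM (what is proved, stated in full; the proofs are below) =====
def Claim_equal_check_clip : Prop := ∀ (clip : List ((Int × Int) × (Int × Int))), Dom_check_clip clip → Spec_check_clip clip (check_clip clip)

-- ===== LEMMAS AND PROOFS =====

-- A's loop, abstracted to the list of sign values it inspects
def goA : List Int → Int → Bool
  | [], _ => true
  | c :: rest, gd =>
    if gd = 0 then goA rest c
    else if gd ≠ c then false
    else goA rest gd

-- the local adjacent-pair check, abstracted to the sign list
def localChk : List Int → Bool
  | [] => true
  | [_] => true
  | a :: b :: t => (a == 0 || a == b) && localChk (b :: t)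

theorem check_clip_loop_eq_goA (clip : List ((Int × Int) × (Int × Int)))
    (is : List Int) (gd : Int) :
    check_clip_loop clip is gd =
      goA (is.map (fun i =>
        vect_mult_sign_z (PySem.List.pyGetD clip i ((0,0),(0,0))).1
          (PySem.List.pyGetD clip i ((0,0),(0,0))).2
          (PySem.List.pyGetD clip (i + 1) ((0,0),(0,0))).2)) gd := by
  induction is generalizing gd with
  | nil => rfl
  | cons i rest ih => simp [check_clip_loop, goA, ih]

theorem goA_nonzero (ss : List Int) (gd : Int) (h : gd ≠ 0) :
    goA ss gd = ss.all (fun s => s == gd) := by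
  induction ss with
  | nil => rfl
  | cons c rest ih =>
    by_cases hc : gd = c
    · subst hc; simp [goA, h, ih]
    · simp [goA, h, hc, Ne.symm hc]

theorem localChk_nonzero (ss : List Int) (c : Int) (h : c ≠ 0) :
    localChk (c :: ss) = ss.all (fun s => s == c) := by
  induction ss with
  | nil => rfl
  | cons d t ih =>
    by_cases hd : d = c
    · subst hd; simp [localChk, h, ih]
    · have h1 : (c == d) = false := by simp; exact fun h' => hd h'.symm
      have h2 : (d == c) = false := by simp [hd]
      have h3 : (c == 0) = false := by simp [h]
      simp [localChk, h1, h2, h3]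

theorem goA_zero (ss : List Int) : goA ss 0 = localChk ss := by
  induction ss with
  | nil => rfl
  | cons c rest ih =>
    by_cases hc : c = 0
    · subst hc
      cases rest with
      | nil => rfl
      | cons b t => simpa [goA, localChk] using ih
    · simp [goA, hc, goA_nonzero rest c hc, localChk_nonzero rest c hc]

-- the sign list A traverses (range + pyGetD) equals the adjacent-pair map
theorem signs_eq (clip : List ((Int × Int) × (Int × Int))) :
    (PySem.List.pyRange 0 ((clip.length : Int) - 1) 1).map (fun i =>
        vect_mult_sign_z (PySem.List.pyGetD clip i ((0,0),(0,0))).1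
          (PySem.List.pyGetD clip i ((0,0),(0,0))).2
          (PySem.List.pyGetD clip (i + 1) ((0,0),(0,0))).2)
      = (clip.zip (clip.drop 1)).map (fun pq => vect_mult_sign_z pq.1.1 pq.1.2 pq.2.2) := by
  apply List.ext_getElem
  · simp [PySem.List.length_pyRange_one]
  · intro k h1 h2
    have hk : k < clip.length - 1 := by
      simp [PySem.List.length_pyRange_one] at h1; omega
    have hk1 : k + 1 < clip.length := by omega
    simp only [List.getElem_map]
    rw [PySem.List.getElem_pyRange_one, zero_add]
    have c1 : PySem.List.pyGetD clip (k : Int) ((0,0),(0,0)) = clip[k] := by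
      rw [PySem.List.pyGetD_natCast]; exact List.getD_eq_getElem _ _ (by omega)
    have c2 : PySem.List.pyGetD clip ((k : Int) + 1) ((0,0),(0,0)) = clip[k + 1] := by
      have : ((k : Int) + 1) = ((k + 1 : Nat) : Int) := by push_cast; ring
      rw [this, PySem.List.pyGetD_natCast]
      exact List.getD_eq_getElem _ _ hk1
    rw [c1, c2]
    simp [List.getElem_zip]

-- B's window-of-3 pass equals localChk over the adjacent-pair sign list
theorem alt_eq_localChk (clip : List ((Int × Int) × (Int × Int))) :
    check_clip_alt clip
      = localChk ((clip.zip (clip.drop 1)).map (fun pq => vect_mult_sign_z pq.1.1 pq.1.2 pq.2.2)) := by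
  induction clip with
  | nil => rfl
  | cons a rest ih =>
    cases rest with
    | nil => rfl
    | cons b t =>
      cases t with
      | nil => rfl
      | cons c u =>
        simp only [check_clip_alt, List.drop, List.zip_cons_cons, List.all_cons, List.map] at ih ⊢
        rw [ih]
        simp [localChk]

-- ===== VERDICT (by name: the statement is the Claim_ definition above) =====
theorem check_clip_spec : Claim_equal_check_clip := by
  intro clip _
  show check_clip clip = check_clip_alt clip
  unfold check_clip
  rw [check_clip_loop_eq_goA, signs_eq, goA_zero, alt_eq_localChk]
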